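-- pv_equiv track=rewrite | github.com/pypi-data/pypi-mirror-219 | packages/task2a/task2a-1.0.22.tar.gz/task2a-1.0.22/pwgen/pwgen.py | split_pattern
-- ===== SOURCE A (Python) =====
-- from typing import Optional, List
--
-- def split_pattern(pattern: str) -> List[str]:
--     """
--     Split pattern to a char list and join {..}, [..] and \\<char> into one element
--     :param pattern: for instance, ud{5}{4}du[d\\m\\@^\\3]
--     :return: list with a single placeholder
--     """
--     ret = []
--     t = ''
--     for el in list(pattern):
--         if el in '[{\\' and not t:
--             t = el
--         elif el in '}]' or t == '\\':
--             t += el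
--             ret.append(t)
--             t = ''
--         elif t:
--             t += el
--         else:
--             ret.append(el)
--
--     return ret
-- ===== SOURCE B (Python) =====
-- def split_pattern(pattern):
--     ret = []
--     i = 0
--     n = len(pattern)
--     while i < n:
--         c = pattern[i]
--         if c == '\\':
--             if i + 1 < n:
--                 ret.append(pattern[i:i + 2])
--             i += 2
--         elif c in '[{':
--             j = i + 1
--             while j < n and pattern[j] not in '}]':
--                 j += 1
--             if j < n:
--                 ret.append(pattern[i:j + 1])
--             i = j + 1
--         else:
--             ret.append(c)
--             i += 1
--     return ret
-- ===== Notes on version B (the rewrite author's own statement) =====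
-- stated objective: alternative
-- what changed: Replaces A's per-character state machine (pending accumulator string t) with an index loop that emits whole tokens by look-ahead slicing: two-char escape slices, and bracket groups sliced in one shot up to the nearest closing bracket.
import Mathlib
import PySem

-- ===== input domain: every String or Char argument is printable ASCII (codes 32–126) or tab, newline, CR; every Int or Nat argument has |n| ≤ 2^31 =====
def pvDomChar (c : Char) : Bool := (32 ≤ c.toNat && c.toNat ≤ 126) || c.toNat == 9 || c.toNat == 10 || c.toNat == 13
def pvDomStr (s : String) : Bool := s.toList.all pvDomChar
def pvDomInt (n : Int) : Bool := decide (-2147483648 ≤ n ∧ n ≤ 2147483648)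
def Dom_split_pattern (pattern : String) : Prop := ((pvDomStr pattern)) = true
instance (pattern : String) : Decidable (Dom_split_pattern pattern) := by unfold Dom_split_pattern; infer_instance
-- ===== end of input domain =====

-- B replaces A's per-character accumulator state machine with an index loop emitting
-- whole tokens by look-ahead slicing (objective: alternative; same O(n) cost).

-- ===== PORT A =====
-- A's loop state: (ret, t) with t the pending accumulator string (as List Char).
def pvStepA (acc : List String × List Char) (el : Char) : List String × List Char :=
  let ret := acc.1
  let t := acc.2
  if (el = '[' ∨ el = '{' ∨ el = '\\') ∧ t = [] then (ret, [el])
  else if (el = '}' ∨ el = ']') ∨ t = ['\\'] then (ret ++ [String.ofList (t ++ [el])], [])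
  else if t ≠ [] then (ret, t ++ [el])
  else (ret ++ [String.ofList [el]], [])

def split_pattern (pattern : String) : List String :=
  (pattern.toList.foldl pvStepA ([], [])).1

-- ===== PORT B =====
-- B scans by index with look-ahead; ported as recursion on the remaining characters,
-- the inner `while j < n and pattern[j] not in '}]'` scan as takeWhile/dropWhile.
def pvNotCloser (d : Char) : Bool := ¬(d = '}' ∨ d = ']')

def pvAltGo : Nat → List Char → List String
  | 0, _ => []
  | _ + 1, [] => []
  | fuel + 1, c :: rest =>
    if c = '\\' then
      match rest with
      | [] => []
      | d :: rest' => String.ofList [c, d] :: pvAltGo fuel rest'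
    else if c = '[' ∨ c = '{' then
      match rest.dropWhile pvNotCloser with
      | [] => []
      | closer :: tail =>
        String.ofList (c :: rest.takeWhile pvNotCloser ++ [closer]) :: pvAltGo fuel tail
    else
      String.ofList [c] :: pvAltGo fuel rest

def split_pattern_alt (pattern : String) : List String := pvAltGo pattern.toList.length pattern.toList

-- ===== PRECONDITION & SPEC =====
def Spec_split_pattern (pattern : String) (out : List String) : Prop := out = split_pattern_alt pattern
instance (pattern : String) (out : List String) : Decidable (Spec_split_pattern pattern out) := by unfold Spec_split_pattern; infer_instance

-- ===== CLAIM (what is proved, stated in full; the proofs are below) =====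
def Claim_equal_split_pattern : Prop := ∀ (pattern : String), Dom_split_pattern pattern → Spec_split_pattern pattern (split_pattern pattern)

-- ===== LEMMAS AND PROOFS =====

-- A's fold from the escape state t = ['\'] consumes one char and closes.
theorem pvEscape (rest : List Char) (ret : List String) :
    rest.foldl pvStepA (ret, ['\\']) =
      match rest with
      | [] => (ret, ['\\'])
      | d :: rest' => rest'.foldl pvStepA (ret ++ [String.ofList ['\\', d]], []) := by
  cases rest with
  | nil => rfl
  | cons d rest' =>
    simp only [List.foldl_cons]
    congr 1
    simp [pvStepA]

-- A's fold from a nonempty non-escape state t scans to the first closer.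
theorem pvGroup (rest : List Char) (ret : List String) (t : List Char)
    (ht : t ≠ []) (ht2 : t ≠ ['\\']) :
    rest.foldl pvStepA (ret, t) =
      match rest.dropWhile pvNotCloser with
      | [] => (ret, t ++ rest)
      | closer :: tail =>
          tail.foldl pvStepA (ret ++ [String.ofList (t ++ rest.takeWhile pvNotCloser ++ [closer])], []) := by
  induction rest generalizing ret t with
  | nil => simp
  | cons d rest' ih =>
    by_cases hd : d = '}' ∨ d = ']'
    · have hnc : pvNotCloser d = false := by simp [pvNotCloser, hd]
      simp only [List.foldl_cons, List.dropWhile_cons, List.takeWhile_cons, hnc]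
      have hstep : pvStepA (ret, t) d = (ret ++ [String.ofList (t ++ [d])], []) := by
        simp [pvStepA, ht, ht2, hd]
      rw [hstep]
      simp
    · have hnc : pvNotCloser d = true := by simp [pvNotCloser]; tauto
      have hstep : pvStepA (ret, t) d = (ret, t ++ [d]) := by
        have c2 : ¬((d = '}' ∨ d = ']') ∨ t = ['\\']) := by tauto
        simp [pvStepA, c2, ht]
      simp only [List.foldl_cons, hstep, List.dropWhile_cons, List.takeWhile_cons, hnc]
      rw [ih ret (t ++ [d]) (by simp) (by intro h; apply ht; cases t <;> simp_all)]
      cases hdr : rest'.dropWhile pvNotCloser with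
      | nil => simp
      | cons closer tail => simp

-- Main invariant: A's fold from the empty state appends exactly B's tokens.
theorem pvMain : ∀ n (cs : List Char), cs.length ≤ n → ∀ ret : List String,
    (cs.foldl pvStepA (ret, [])).1 = ret ++ pvAltGo n cs := by
  intro n
  induction n with
  | zero =>
    intro cs h ret
    have : cs = [] := List.eq_nil_of_length_eq_zero (Nat.le_zero.mp h)
    subst this; simp [pvAltGo]
  | succ n ih =>
    intro cs h ret
    cases cs with
    | nil => simp [pvAltGo]
    | cons c rest =>
      by_cases hb : c = '\\'
      · subst hb
        have hstep : pvStepA (ret, []) '\\' = (ret, ['\\']) := by simp [pvStepA]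
        simp only [List.foldl_cons, hstep]
        rw [pvEscape]
        cases rest with
        | nil => simp [pvAltGo]
        | cons d rest' =>
          simp only []
          rw [ih rest' (by simp at h; omega) _]
          simp [pvAltGo]
      · by_cases hbr : c = '[' ∨ c = '{'
        · have hstep : pvStepA (ret, []) c = (ret, [c]) := by
            rcases hbr with h1 | h1 <;> subst h1 <;> simp [pvStepA]
          simp only [List.foldl_cons, hstep]
          rw [pvGroup rest ret [c] (by simp) (by simp [hb])]
          cases hdr : rest.dropWhile pvNotCloser with
          | nil => simp [pvAltGo, hb, hbr, hdr]
          | cons closer tail =>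
            have htail : tail.length ≤ n := by
              have h1 : (rest.dropWhile pvNotCloser).length ≤ rest.length :=
                rest.length_dropWhile_le pvNotCloser
              rw [hdr] at h1; simp at h1 h ⊢; omega
            simp only []
            rw [ih tail htail]
            simp [pvAltGo, hb, hbr, hdr]
        · have hstep2 : pvStepA (ret, []) c = (ret ++ [String.ofList [c]], []) := by
            by_cases hc : c = '}' ∨ c = ']' <;> simp [pvStepA, hb, hbr, hc]
          simp only [List.foldl_cons, hstep2]
          rw [ih rest (by simp at h; omega)]
          simp [pvAltGo, hb, hbr]

-- ===== VERDICT (by name: the statement is the Claim_ definition above) =====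
theorem split_pattern_spec : Claim_equal_split_pattern := by
  intro pattern _
  unfold Spec_split_pattern split_pattern split_pattern_alt
  exact (pvMain pattern.toList.length pattern.toList le_rfl []).trans (by simp)
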